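-- pv_equiv track=rewrite | github.com/GlacioHack/xdem | xdem/terrain.py | _preprocess_windowed_indexes
-- ===== SOURCE A (Python) =====
-- def _preprocess_windowed_indexes(windowed_indexes: list[str]) -> tuple[list[int], list[bool], int]:
--     """
--     Pre-processing for windowed indexes.
--
--     Map ordered indexes to be used to derive them through SciPy or Numba loop efficiently. (to minimize memory and CPU
--     usage)
--
--     Returns list of indexes to map attributes, list of booleans to make attributes, and the size of the output
--     attribute array.
--     """
--
--     # Step 2: Derive ordered indexes for attributes/coefs outside of SciPy/Numba processing for speed
--
--     # Define booleans for generating attributes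
--     make_tpi = "topographic_position_index" in windowed_indexes
--     make_tri = "terrain_ruggedness_index" in windowed_indexes
--     make_roughness = "roughness" in windowed_indexes
--     make_rugosity = "rugosity" in windowed_indexes
--     make_fractal_roughness = "fractal_roughness" in windowed_indexes
--
--     make_attrs = [make_tpi, make_tri, make_roughness, make_rugosity, make_fractal_roughness]
--
--     # Map index of attributes and coefficients to defined order
--     order_attrs = [
--         "topographic_position_index",
--         "terrain_ruggedness_index",
--         "roughness",
--         "rugosity",
--         "fractal_roughness",
--     ]
--     idx_attrs = [windowed_indexes.index(oa) if oa in windowed_indexes else 99 for oa in order_attrs]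
--
--     # Because of the above indexes, we don't store the length of the output attributes anymore
--     attrs_size = len(windowed_indexes)
--
--     return idx_attrs, make_attrs, attrs_size
-- ===== SOURCE B (Python) =====
-- _NAME_TO_SLOT = {
--     "topographic_position_index": 0,
--     "terrain_ruggedness_index": 1,
--     "roughness": 2,
--     "rugosity": 3,
--     "fractal_roughness": 4,
-- }
--
--
-- def _preprocess_windowed_indexes(windowed_indexes: list[str]) -> tuple[list[int], list[bool], int]:
--     # Single pass: record the first occurrence index and a seen-flag per attribute slot.
--     idx_attrs = [99] * 5
--     make_attrs = [False] * 5
--     for i, name in enumerate(windowed_indexes):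
--         slot = _NAME_TO_SLOT.get(name)
--         if slot is not None and not make_attrs[slot]:
--             make_attrs[slot] = True
--             idx_attrs[slot] = i
--     return idx_attrs, make_attrs, len(windowed_indexes)
-- ===== Notes on version B (the rewrite author's own statement) =====
-- stated objective: alternative
-- what changed: Replaces A's five membership tests plus five list.index scans (one pass per attribute) with a single enumerate pass that records the first-occurrence index and a seen-flag per attribute slot via a fixed name-to-slot dict.
import Mathlib
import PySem

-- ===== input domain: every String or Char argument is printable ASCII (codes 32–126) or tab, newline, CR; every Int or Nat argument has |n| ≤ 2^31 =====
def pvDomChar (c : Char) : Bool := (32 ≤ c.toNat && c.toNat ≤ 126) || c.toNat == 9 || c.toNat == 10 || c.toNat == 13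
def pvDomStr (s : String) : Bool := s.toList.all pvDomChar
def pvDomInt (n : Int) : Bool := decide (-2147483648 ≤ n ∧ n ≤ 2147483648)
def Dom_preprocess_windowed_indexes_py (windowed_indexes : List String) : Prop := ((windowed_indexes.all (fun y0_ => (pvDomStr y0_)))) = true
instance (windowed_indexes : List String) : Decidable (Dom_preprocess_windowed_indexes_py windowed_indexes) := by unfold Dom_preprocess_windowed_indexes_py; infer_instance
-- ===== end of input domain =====

-- B replaces A's five membership tests + five list.index scans with one enumerate pass
-- recording first-occurrence index and seen-flag per attribute slot (objective: alternative).

-- ===== PORT A =====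
def pvOrderAttrs : List String :=
  ["topographic_position_index", "terrain_ruggedness_index", "roughness", "rugosity", "fractal_roughness"]

def preprocess_windowed_indexes_py (windowed_indexes : List String) : List Int × List Bool × Int :=
  let make_tpi := windowed_indexes.contains "topographic_position_index"
  let make_tri := windowed_indexes.contains "terrain_ruggedness_index"
  let make_roughness := windowed_indexes.contains "roughness"
  let make_rugosity := windowed_indexes.contains "rugosity"
  let make_fractal_roughness := windowed_indexes.contains "fractal_roughness"
  let make_attrs := [make_tpi, make_tri, make_roughness, make_rugosity, make_fractal_roughness]
  let idx_attrs := pvOrderAttrs.map (fun oa =>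
    if windowed_indexes.contains oa then (((PySem.List.index? windowed_indexes oa).getD 0 : Nat) : Int) else 99)
  let attrs_size : Int := windowed_indexes.length
  (idx_attrs, make_attrs, attrs_size)

-- ===== PORT B =====
def pvNameToSlot (name : String) : Option Nat :=
  if name = "topographic_position_index" then some 0
  else if name = "terrain_ruggedness_index" then some 1
  else if name = "roughness" then some 2
  else if name = "rugosity" then some 3
  else if name = "fractal_roughness" then some 4
  else none

def pvBLoop : Nat → List String → List Int × List Bool → List Int × List Bool
  | _, [], st => st
  | i, name :: rest, (idx, mk) =>
    match pvNameToSlot name with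
    | some s =>
      if mk.getD s false then pvBLoop (i + 1) rest (idx, mk)
      else pvBLoop (i + 1) rest (idx.set s (i : Int), mk.set s true)
    | none => pvBLoop (i + 1) rest (idx, mk)

def preprocess_windowed_indexes_py_alt (windowed_indexes : List String) : List Int × List Bool × Int :=
  let st := pvBLoop 0 windowed_indexes ([99, 99, 99, 99, 99], [false, false, false, false, false])
  (st.1, st.2, (windowed_indexes.length : Int))

-- ===== PRECONDITION & SPEC =====
def Spec_preprocess_windowed_indexes_py (windowed_indexes : List String) (out : List Int × List Bool × Int) : Prop := out = preprocess_windowed_indexes_py_alt windowed_indexes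
instance (windowed_indexes : List String) (out : List Int × List Bool × Int) : Decidable (Spec_preprocess_windowed_indexes_py windowed_indexes out) := by unfold Spec_preprocess_windowed_indexes_py; infer_instance

-- ===== CLAIM (what is proved, stated in full; the proofs are below) =====
def Claim_equal_preprocess_windowed_indexes_py : Prop := ∀ (windowed_indexes : List String), Dom_preprocess_windowed_indexes_py windowed_indexes → Spec_preprocess_windowed_indexes_py windowed_indexes (preprocess_windowed_indexes_py windowed_indexes)

-- ===== LEMMAS AND PROOFS =====

theorem pv_slot_spec (name : String) (t : Nat) (h : pvNameToSlot name = some t) :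
    t < 5 ∧ name = pvOrderAttrs.getD t "" ∧
      ∀ s, s < 5 → s ≠ t → pvOrderAttrs.getD s "" ≠ name := by
  unfold pvNameToSlot at h
  split_ifs at h with h0 h1 h2 h3 h4 <;>
    (injection h with h; subst h; subst_vars;
     refine ⟨by norm_num, by simp [pvOrderAttrs], ?_⟩;
     intro s hs hst; interval_cases s <;> simp_all [pvOrderAttrs])

theorem pv_noslot_spec (name : String) (h : pvNameToSlot name = none) :
    ∀ s, s < 5 → pvOrderAttrs.getD s "" ≠ name := by
  unfold pvNameToSlot at h
  split_ifs at h with h0 h1 h2 h3 h4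
  intro s hs; interval_cases s <;>
    [exact Ne.symm h0; exact Ne.symm h1; exact Ne.symm h2; exact Ne.symm h3; exact Ne.symm h4]

theorem pv_getD_set_ne {α : Type} (l : List α) (t s : Nat) (v d : α) (h : s ≠ t) :
    (l.set t v).getD s d = l.getD s d := by
  simp [List.getD_eq_getElem?_getD, List.getElem?_set_ne (by omega : t ≠ s)]

theorem pv_contains_cons_ne (mkv : Bool) (name ns : String) (rest : List String) (h : name ≠ ns) :
    (mkv || rest.contains ns) = (mkv || (name :: rest).contains ns) := by
  simp [List.contains_cons, Ne.symm h]

theorem pv_idx_cons_ne (name ns : String) (rest : List String) (h : name ≠ ns)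
    (mkv : Bool) (d : Int) (i : Nat) :
    (if mkv then d
     else match PySem.List.index? rest ns with
          | some k => ((i + 1 + k : Nat) : Int)
          | none => d)
      = (if mkv then d
         else match PySem.List.index? (name :: rest) ns with
              | some k => ((i + k : Nat) : Int)
              | none => d) := by
  rw [PySem.List.index?_cons_of_ne rest h]
  cases h2 : PySem.List.index? rest ns with
  | none => rfl
  | some k =>
    simp only [Option.map_some]
    congr 1
    congr 1
    omega

theorem pv_loop_inv : ∀ (xs : List String) (i : Nat) (idx : List Int) (mk : List Bool),
    idx.length = 5 → mk.length = 5 →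
    (pvBLoop i xs (idx, mk)).1.length = 5 ∧ (pvBLoop i xs (idx, mk)).2.length = 5 ∧
    ∀ s, s < 5 →
      (pvBLoop i xs (idx, mk)).2.getD s false
        = (mk.getD s false || xs.contains (pvOrderAttrs.getD s "")) ∧
      (pvBLoop i xs (idx, mk)).1.getD s 0
        = (if mk.getD s false then idx.getD s 0
           else match PySem.List.index? xs (pvOrderAttrs.getD s "") with
                | some k => ((i + k : Nat) : Int)
                | none => idx.getD s 0) := by
  intro xs
  induction xs with
  | nil =>
    intro i idx mk hidx hmk
    refine ⟨hidx, hmk, ?_⟩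
    intro s hs
    simp [pvBLoop, PySem.List.index?_eq_idxOf?]
  | cons name rest ih =>
    intro i idx mk hidx hmk
    cases hslot : pvNameToSlot name with
    | none =>
      have hne := pv_noslot_spec name hslot
      simp only [pvBLoop, hslot]
      obtain ⟨L1, L2, H⟩ := ih (i + 1) idx mk hidx hmk
      refine ⟨L1, L2, ?_⟩
      intro s hs
      obtain ⟨Hb, Hf⟩ := H s hs
      have hne' : name ≠ pvOrderAttrs.getD s "" := (hne s hs).symm
      refine ⟨?_, ?_⟩
      · rw [Hb]; exact pv_contains_cons_ne _ _ _ _ hne'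
      · rw [Hf]; exact pv_idx_cons_ne _ _ _ hne' _ _ _
    | some t =>
      obtain ⟨ht5, htn, hne⟩ := pv_slot_spec name t hslot
      by_cases hflag : mk.getD t false = true
      · simp only [pvBLoop, hslot, hflag, if_true]
        obtain ⟨L1, L2, H⟩ := ih (i + 1) idx mk hidx hmk
        refine ⟨L1, L2, ?_⟩
        intro s hs
        obtain ⟨Hb, Hf⟩ := H s hs
        by_cases hst : s = t
        · subst hst
          refine ⟨by rw [Hb, hflag]; simp, by rw [Hf, if_pos hflag, if_pos hflag]⟩
        · have hne' : name ≠ pvOrderAttrs.getD s "" := (hne s hs hst).symm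
          refine ⟨?_, ?_⟩
          · rw [Hb]; exact pv_contains_cons_ne _ _ _ _ hne'
          · rw [Hf]; exact pv_idx_cons_ne _ _ _ hne' _ _ _
      · have hflag' : mk.getD t false = false := by simpa using hflag
        simp only [pvBLoop, hslot, hflag', if_false, Bool.false_eq_true]
        obtain ⟨L1, L2, H⟩ := ih (i + 1) (idx.set t (i : Int)) (mk.set t true)
          (by simp [hidx]) (by simp [hmk])
        refine ⟨L1, L2, ?_⟩
        intro s hs
        obtain ⟨Hb, Hf⟩ := H s hs
        by_cases hst : s = t
        · subst hst
          have hmkset : (mk.set s true).getD s false = true := by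
            simp [List.getD_eq_getElem?_getD, hmk, hs]
          have hidxset : (idx.set s (i : Int)).getD s 0 = (i : Int) := by
            simp [List.getD_eq_getElem?_getD, hidx, hs]
          refine ⟨?_, ?_⟩
          · rw [Hb, hmkset, hflag', ← htn]
            simp [List.contains_cons]
          · rw [Hf, if_pos hmkset, hidxset, if_neg hflag, ← htn,
              PySem.List.index?_cons_self]
            simp
        · have hne' : name ≠ pvOrderAttrs.getD s "" := (hne s hs hst).symm
          rw [pv_getD_set_ne mk t s true false hst] at Hb
          rw [pv_getD_set_ne mk t s true false hst] at Hf
          rw [pv_getD_set_ne idx t s (i : Int) 0 hst] at Hf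
          refine ⟨?_, ?_⟩
          · rw [Hb]; exact pv_contains_cons_ne _ _ _ _ hne'
          · rw [Hf]; exact pv_idx_cons_ne _ _ _ hne' _ _ _

theorem pv_len5_eq {α : Type} (d : α) :
    ∀ l : List α, l.length = 5 → l = [l.getD 0 d, l.getD 1 d, l.getD 2 d, l.getD 3 d, l.getD 4 d]
  | [_, _, _, _, _], _ => rfl

theorem pv_slot_entry (xs : List String) (n : String) :
    (if xs.contains n then (((PySem.List.index? xs n).getD 0 : Nat) : Int) else 99)
      = (if (false : Bool) then (99 : Int)
         else match PySem.List.index? xs n with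
              | some k => ((0 + k : Nat) : Int)
              | none => 99) := by
  cases h : PySem.List.index? xs n with
  | none =>
    have : ¬ n ∈ xs := (PySem.List.index?_eq_none_iff xs n).mp h
    simp [this]
  | some k =>
    have hm : n ∈ xs := (PySem.List.index?_isSome_iff xs n).mp (by rw [h]; rfl)
    simp [hm, h]

-- ===== VERDICT (by name: the statement is the Claim_ definition above) =====
theorem preprocess_windowed_indexes_py_spec : Claim_equal_preprocess_windowed_indexes_py := by
  intro xs _
  unfold Spec_preprocess_windowed_indexes_py preprocess_windowed_indexes_py preprocess_windowed_indexes_py_alt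
  obtain ⟨L1, L2, H⟩ := pv_loop_inv xs 0 [99, 99, 99, 99, 99] [false, false, false, false, false] rfl rfl
  refine Prod.ext ?_ (Prod.ext ?_ rfl)
  · show _ = (pvBLoop 0 xs ([99,99,99,99,99], [false,false,false,false,false])).1
    rw [pv_len5_eq (0 : Int) _ L1]
    have h0 := (H 0 (by norm_num)).2
    have h1 := (H 1 (by norm_num)).2
    have h2 := (H 2 (by norm_num)).2
    have h3 := (H 3 (by norm_num)).2
    have h4 := (H 4 (by norm_num)).2
    simp only [pvOrderAttrs, List.getD] at h0 h1 h2 h3 h4 ⊢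
    rw [h0, h1, h2, h3, h4]
    simp only [pvOrderAttrs, List.map]
    rw [pv_slot_entry, pv_slot_entry, pv_slot_entry, pv_slot_entry, pv_slot_entry]
    rfl
  · show _ = (pvBLoop 0 xs ([99,99,99,99,99], [false,false,false,false,false])).2
    rw [pv_len5_eq false _ L2]
    have h0 := (H 0 (by norm_num)).1
    have h1 := (H 1 (by norm_num)).1
    have h2 := (H 2 (by norm_num)).1
    have h3 := (H 3 (by norm_num)).1
    have h4 := (H 4 (by norm_num)).1
    simp only [pvOrderAttrs, List.getD] at h0 h1 h2 h3 h4 ⊢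
    rw [h0, h1, h2, h3, h4]
    rfl
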